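-- pv_equiv track=rewrite | github.com/tomekniemczyk/robopong-app | backend/training.py | _filter_steps
-- ===== SOURCE A (Python) =====
-- def _filter_steps(steps: list, skip_warmup: bool, skip_cooldown: bool) -> tuple:
--     """Return (filtered_steps, skipped_indices, index_map) with warmup/cooldown removed.
--     index_map maps filtered index → original index so recordings/broadcasts use correct step numbers."""
--     if not steps or (not skip_warmup and not skip_cooldown):
--         return steps, set(), {i: i for i in range(len(steps))}
--     skipped = set()
--     if skip_warmup:
--         for i, s in enumerate(steps):
--             if s.get("exercise_id"):
--                 skipped.add(i)
--             else:
--                 break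
--     if skip_cooldown:
--         for i in range(len(steps) - 1, -1, -1):
--             if steps[i].get("exercise_id"):
--                 skipped.add(i)
--             else:
--                 break
--     filtered = []
--     index_map = {}
--     for i, s in enumerate(steps):
--         if i not in skipped:
--             index_map[len(filtered)] = i
--             filtered.append(s)
--     return filtered, skipped, index_map
-- ===== SOURCE B (Python) =====
-- def _run(seq):
--     """Length of the leading run of steps with a truthy exercise_id."""
--     k = 0
--     for s in seq:
--         if s.get("exercise_id"):
--             k += 1
--         else:
--             break
--     return k
--
--
-- def _filter_steps(steps: list, skip_warmup: bool, skip_cooldown: bool) -> tuple: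
--     """Boundary-based version: compute the two cut points and slice once."""
--     n = len(steps)
--     lo = _run(steps) if skip_warmup else 0
--     hi = n - (_run(reversed(steps)) if skip_cooldown else 0)
--     filtered = steps[lo:hi]
--     skipped = set(range(lo)) | set(range(n - 1, hi - 1, -1))
--     index_map = {j: lo + j for j in range(len(filtered))}
--     return filtered, skipped, index_map
-- ===== Notes on version B (the rewrite author's own statement) =====
-- stated objective: alternative
-- what changed: B replaces A's three scans (two break-loops building a skipped set plus a final per-index membership-test rebuild loop) by computing two integer cut points (leading/trailing truthy-run lengths) and producing the result with one slice, two ranges and a direct index map - no membership tests at all.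
import Mathlib
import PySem

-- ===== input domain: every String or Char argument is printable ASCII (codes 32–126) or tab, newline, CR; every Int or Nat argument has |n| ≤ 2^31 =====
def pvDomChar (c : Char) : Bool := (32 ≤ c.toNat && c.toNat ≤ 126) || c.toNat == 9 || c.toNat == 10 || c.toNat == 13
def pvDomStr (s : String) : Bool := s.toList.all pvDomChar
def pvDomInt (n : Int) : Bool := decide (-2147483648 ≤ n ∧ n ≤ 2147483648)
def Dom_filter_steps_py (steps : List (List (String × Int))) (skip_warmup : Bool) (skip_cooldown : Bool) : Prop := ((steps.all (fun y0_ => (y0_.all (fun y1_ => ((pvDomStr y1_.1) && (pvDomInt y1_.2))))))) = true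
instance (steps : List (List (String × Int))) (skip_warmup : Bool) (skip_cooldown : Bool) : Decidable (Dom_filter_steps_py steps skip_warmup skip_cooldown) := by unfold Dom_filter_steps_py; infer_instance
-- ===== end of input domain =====

-- B recomputes _filter_steps from two integer cut points (leading/trailing truthy-run lengths)
-- and one slice instead of A's skipped-set membership filtering; same O(n) cost, alternative algorithm.

-- ===== PORT A =====
-- Shared with port B (both Pythons test s.get("exercise_id") for truthiness; values are Int, truthy ⟺ ≠ 0)
def pvTruthy (s : List (String × Int)) : Bool :=
  match (PySem.Dict.mk s).get? "exercise_id" with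
  | some v => v != 0
  | none => false

-- 'if skip_warmup: for i, s in enumerate(steps): …'
def pvWarmLoop (l : List (List (String × Int))) (i : Int) (sk : PySem.Set Int) : PySem.Set Int :=
  match l with
  | [] => sk
  | s :: rest => if pvTruthy s then pvWarmLoop rest (i + 1) (PySem.Set.add sk i) else sk

-- 'if skip_cooldown: for i in range(len(steps)-1, -1, -1): …'; steps[i] is always in range here,
-- so pyGetD is exact
def pvCoolLoop (steps : List (List (String × Int))) (idxs : List Int) (sk : PySem.Set Int) : PySem.Set Int :=
  match idxs with
  | [] => sk
  | i :: rest =>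
    if pvTruthy (PySem.List.pyGetD steps i []) then pvCoolLoop steps rest (PySem.Set.add sk i) else sk

-- final 'for i, s in enumerate(steps): if i not in skipped: …'
def pvBuildLoop (l : List (List (String × Int))) (i : Int) (sk : PySem.Set Int)
    (filt : List (List (String × Int))) (im : PySem.Dict Int Int) :
    List (List (String × Int)) × PySem.Dict Int Int :=
  match l with
  | [] => (filt, im)
  | s :: rest =>
    if PySem.Set.contains sk i then pvBuildLoop rest (i + 1) sk filt im
    else pvBuildLoop rest (i + 1) sk (filt ++ [s]) (im.insert (filt.length : Int) i)

def filter_steps_py (steps : List (List (String × Int))) (skip_warmup : Bool) (skip_cooldown : Bool) : (List (List (String × Int))) × List Int × (List (Int × Int)) :=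
  if steps.isEmpty || (!skip_warmup && !skip_cooldown) then
    (steps, PySem.Set.empty,
      ((PySem.List.pyRange 0 (steps.length : Int) 1).foldl
        (fun d i => d.insert i i) PySem.Dict.empty).items)
  else
    let skipped := if skip_warmup then pvWarmLoop steps 0 PySem.Set.empty else PySem.Set.empty
    let skipped := if skip_cooldown then
        pvCoolLoop steps (PySem.List.pyRange ((steps.length : Int) - 1) (-1) (-1)) skipped
      else skipped
    let r := pvBuildLoop steps 0 skipped [] PySem.Dict.empty
    (r.1, skipped, r.2.items)

-- ===== PORT B =====
-- helper _run: length of the leading truthy run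
def pvRunLen (l : List (List (String × Int))) : Int :=
  match l with
  | [] => 0
  | s :: rest => if pvTruthy s then 1 + pvRunLen rest else 0

def filter_steps_py_alt (steps : List (List (String × Int))) (skip_warmup : Bool) (skip_cooldown : Bool) : (List (List (String × Int))) × List Int × (List (Int × Int)) :=
  let n : Int := (steps.length : Int)
  let lo : Int := if skip_warmup then pvRunLen steps else 0
  let hi : Int := n - (if skip_cooldown then pvRunLen steps.reverse else 0)
  let filtered := PySem.List.slice steps (some lo) (some hi)
  let skipped := PySem.Set.union (PySem.Set.ofList (PySem.List.pyRange 0 lo 1))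
                   (PySem.List.pyRange (n - 1) (hi - 1) (-1))
  -- dict comprehension with the distinct keys 0..len(filtered)-1
  let im := ((PySem.List.pyRange 0 (filtered.length : Int) 1).foldl
      (fun d j => d.insert j (lo + j)) PySem.Dict.empty).items
  (filtered, skipped, im)

-- ===== PRECONDITION & SPEC =====
def Spec_filter_steps_py (steps : List (List (String × Int))) (skip_warmup : Bool) (skip_cooldown : Bool) (out : (List (List (String × Int))) × List Int × (List (Int × Int))) : Prop := out = filter_steps_py_alt steps skip_warmup skip_cooldown
instance (steps : List (List (String × Int))) (skip_warmup : Bool) (skip_cooldown : Bool) (out : (List (List (String × Int))) × List Int × (List (Int × Int))) : Decidable (Spec_filter_steps_py steps skip_warmup skip_cooldown out) := by unfold Spec_filter_steps_py; infer_instance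

-- ===== CLAIM (what is proved, stated in full; the proofs are below) =====
def Claim_equal_filter_steps_py : Prop := ∀ (steps : List (List (String × Int))) (skip_warmup : Bool) (skip_cooldown : Bool), Dom_filter_steps_py steps skip_warmup skip_cooldown → Spec_filter_steps_py steps skip_warmup skip_cooldown (filter_steps_py steps skip_warmup skip_cooldown)

-- ===== LEMMAS AND PROOFS =====

-- length of the leading truthy run, as a Nat (proof-side mirror of pvRunLen)
def pvCnt (l : List (List (String × Int))) : Nat := (l.takeWhile pvTruthy).length

theorem pvRunLen_eq (l : List (List (String × Int))) : pvRunLen l = (pvCnt l : Int) := by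
  induction l with
  | nil => rfl
  | cons s rest ih =>
    rw [show pvRunLen (s :: rest) = if pvTruthy s = true then 1 + pvRunLen rest else 0 from rfl]
    rw [pvCnt, List.takeWhile_cons]
    by_cases h : pvTruthy s = true
    · rw [if_pos h, if_pos h, ih, List.length_cons, pvCnt]
      push_cast
      ring
    · rw [if_neg h, if_neg h]
      rfl

theorem pvCnt_le (l : List (List (String × Int))) : pvCnt l ≤ l.length :=
  (List.takeWhile_prefix _).length_le

theorem pvWarm_spec (l : List (List (String × Int))) : ∀ (i : Int) (sk : PySem.Set Int),
    (∀ x ∈ sk, x < i) →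
    pvWarmLoop l i sk = sk ++ PySem.List.pyRange i (i + (pvCnt l : Int)) 1 := by
  induction l with
  | nil =>
    intro i sk _
    simp [pvWarmLoop, pvCnt, PySem.List.pyRange_one_eq_nil (le_refl i)]
  | cons s rest ih =>
    intro i sk hsk
    by_cases h : pvTruthy s = true
    · have hnm : i ∉ sk := fun hm => absurd (hsk i hm) (lt_irrefl i)
      have hcnt : pvCnt (s :: rest) = pvCnt rest + 1 := by
        simp [pvCnt, List.takeWhile, h]
      rw [pvWarmLoop, if_pos h, PySem.Set.add_of_not_mem hnm,
        ih (i+1) (sk ++ [i]) (by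
          intro x hx
          rcases List.mem_append.mp hx with hx | hx
          · exact lt_trans (hsk x hx) (by omega)
          · simp at hx; omega)]
      have hb : (i + 1) + (pvCnt rest : Int) = i + (pvCnt (s :: rest) : Int) := by
        rw [hcnt]; push_cast; ring
      rw [List.append_assoc]
      congr 1
      rw [PySem.List.pyRange_one_cons (show i < i + (pvCnt (s :: rest) : Int) by
        rw [hcnt]; push_cast; omega)]
      simp only [List.singleton_append, List.cons.injEq, true_and]
      rw [hb]
    · have hcnt : pvCnt (s :: rest) = 0 := by
        simp [pvCnt, List.takeWhile, Bool.eq_false_iff.mpr h]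
      rw [pvWarmLoop, if_neg h, hcnt]
      simp [PySem.List.pyRange_one_eq_nil (by omega : i + ((0:Nat):Int) ≤ i)]

theorem pvCool_spec (steps : List (List (String × Int))) :
    ∀ (idxs : List Int) (sk : PySem.Set Int),
    pvCoolLoop steps idxs sk =
      (idxs.takeWhile (fun i => pvTruthy (PySem.List.pyGetD steps i []))).foldl PySem.Set.add sk := by
  intro idxs
  induction idxs with
  | nil => intro sk; rfl
  | cons i rest ih =>
    intro sk
    by_cases h : pvTruthy (PySem.List.pyGetD steps i []) = true
    · rw [pvCoolLoop, if_pos h]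
      simp only [List.takeWhile, h, List.foldl]
      exact ih _
    · rw [pvCoolLoop, if_neg h]
      simp [List.takeWhile, Bool.eq_false_iff.mpr h]

theorem takeWhile_split {α : Type} (p : α → Bool) :
    ∀ (l1 l2 : List α), (∀ x ∈ l1, p x = true) → (∀ x, l2.head? = some x → p x = false) →
    (l1 ++ l2).takeWhile p = l1 := by
  intro l1
  induction l1 with
  | nil =>
    intro l2 _ h2
    cases l2 with
    | nil => rfl
    | cons y t => simp [List.takeWhile, h2 y rfl]
  | cons x t ih =>
    intro l2 h1 h2
    simp only [List.cons_append, List.takeWhile, h1 x (by simp)]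
    rw [ih l2 (fun y hy => h1 y (by simp [hy])) h2]

theorem pvCnt_getElem_true (l : List (List (String × Int))) (k : Nat) (hk : k < pvCnt l) :
    pvTruthy (l[k]'(lt_of_lt_of_le hk (pvCnt_le l))) = true := by
  have hpre := List.takeWhile_prefix (l := l) pvTruthy
  have hget := hpre.getElem (i := k) hk
  exact hget ▸ List.mem_takeWhile_imp (List.getElem_mem hk)

theorem dropWhile_eq_drop {α : Type} (p : α → Bool) (l : List α) :
    l.dropWhile p = l.drop (l.takeWhile p).length := by
  induction l with
  | nil => rfl
  | cons x t ih =>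
    by_cases h : p x = true
    · simp [List.dropWhile_cons, List.takeWhile_cons, h, ih]
    · simp [List.dropWhile_cons, List.takeWhile_cons, h]

theorem pvCnt_getElem_false (l : List (List (String × Int))) (h : pvCnt l < l.length) :
    pvTruthy (l[pvCnt l]) = false := by
  have hlen : (l.dropWhile pvTruthy).length = l.length - pvCnt l := by
    rw [dropWhile_eq_drop]
    simp [pvCnt]
  have hd : l.dropWhile pvTruthy ≠ [] := by
    apply List.ne_nil_of_length_pos
    omega
  have hhead := List.head_dropWhile_not pvTruthy hd
  rw [List.head_eq_getElem hd] at hhead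
  have hidx : (l.dropWhile pvTruthy)[0]'(by
      simpa using List.length_pos_iff.mpr hd) = l[pvCnt l] := by
    simp only [dropWhile_eq_drop, List.getElem_drop, pvCnt]
    simp
  rwa [hidx] at hhead

-- truthiness of steps[i] for indices in the trailing run, and falsity just before it
theorem pvTrail_true (steps : List (List (String × Int))) (x : Int)
    (h1 : ((steps.length - pvCnt steps.reverse : Nat) : Int) ≤ x) (h2 : x < (steps.length : Int)) :
    pvTruthy (PySem.List.pyGetD steps x []) = true := by
  have hrn : pvCnt steps.reverse ≤ steps.length := by
    have := pvCnt_le steps.reverse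
    simpa using this
  have hx0 : (0:Int) ≤ x := le_trans (by positivity) h1
  have hxn : x.toNat < steps.length := by omega
  rw [PySem.List.pyGetD_eq_getElem steps [] hx0 (by omega)]
  have hk : steps.length - 1 - x.toNat < pvCnt steps.reverse := by omega
  have ht := pvCnt_getElem_true steps.reverse (steps.length - 1 - x.toNat)
    (by simpa using hk)
  rw [List.getElem_reverse] at ht
  have : steps.length - 1 - (steps.length - 1 - x.toNat) = x.toNat := by omega
  simp only [List.length_reverse, this] at ht
  exact ht

theorem pvTrail_false (steps : List (List (String × Int)))
    (h : 0 < steps.length - pvCnt steps.reverse) :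
    pvTruthy (PySem.List.pyGetD steps
      (((steps.length - pvCnt steps.reverse : Nat) : Int) - 1) []) = false := by
  have hrn : pvCnt steps.reverse ≤ steps.length := by
    have := pvCnt_le steps.reverse
    simpa using this
  have hrlt : pvCnt steps.reverse < steps.reverse.length := by
    simpa using (by omega : pvCnt steps.reverse < steps.length)
  have hf := pvCnt_getElem_false steps.reverse hrlt
  rw [List.getElem_reverse] at hf
  rw [show ((steps.length - pvCnt steps.reverse : Nat) : Int) - 1
      = ((steps.length - 1 - pvCnt steps.reverse : Nat) : Int) from by omega]
  rw [PySem.List.pyGetD_eq_getElem steps [] (by positivity) (by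
    push_cast
    omega)]
  convert hf using 2

-- the cooldown scan's takeWhile is exactly the descending range down to hi
theorem pvDesc_takeWhile (steps : List (List (String × Int))) :
    (PySem.List.pyRange ((steps.length : Int) - 1) (-1) (-1)).takeWhile
      (fun i => pvTruthy (PySem.List.pyGetD steps i [])) =
    PySem.List.pyRange ((steps.length : Int) - 1)
      (((steps.length - pvCnt steps.reverse : Nat) : Int) - 1) (-1) := by
  have hrn : pvCnt steps.reverse ≤ steps.length := by
    have := pvCnt_le steps.reverse
    simpa using this
  set n := steps.length
  set hn := n - pvCnt steps.reverse with hhn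
  have e1 : PySem.List.pyRange ((n:Int)-1) (-1) (-1) = (PySem.List.pyRange 0 (n:Int)).reverse := by
    rw [PySem.List.pyRange_neg_one_eq_reverse]
    norm_num
  have e2 : PySem.List.pyRange ((n:Int)-1) ((hn:Int)-1) (-1) =
      (PySem.List.pyRange (hn:Int) (n:Int)).reverse := by
    rw [PySem.List.pyRange_neg_one_eq_reverse]
    norm_num
  have esplit : PySem.List.pyRange 0 (n:Int) =
      PySem.List.pyRange 0 (hn:Int) ++ PySem.List.pyRange (hn:Int) (n:Int) :=
    PySem.List.pyRange_one_append 0 (hn:Int) (n:Int) (by positivity) (by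
      push_cast
      omega)
  rw [e1, esplit, List.reverse_append, e2]
  apply takeWhile_split
  · intro x hx
    rw [List.mem_reverse, PySem.List.mem_pyRange_one] at hx
    exact pvTrail_true steps x hx.1 hx.2
  · intro x hx
    by_cases hpos : 0 < hn
    · have hsucc : (hn : Int) = ((hn - 1 : Nat) : Int) + 1 := by omega
      rw [hsucc, PySem.List.pyRange_one_succ_right (by positivity)] at hx
      simp only [List.reverse_append, List.reverse_cons, List.reverse_nil, List.nil_append,
        List.cons_append, List.head?_cons, Option.some.injEq] at hx
      subst hx
      have := pvTrail_false steps (by omega)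
      rw [show (((hn : Nat) : Int) - 1) = ((hn - 1 : Nat) : Int) by omega] at this
      exact this
    · have : hn = 0 := by omega
      rw [this] at hx
      simp [PySem.List.pyRange_one_eq_nil (le_refl (0:Int))] at hx

-- closed forms for both programs' skipped set (the Int cut points)
def pvLoI (steps : List (List (String × Int))) (sw : Bool) : Int :=
  if sw then (pvCnt steps : Int) else 0

def pvHiI (steps : List (List (String × Int))) (sc : Bool) : Int :=
  (steps.length : Int) - (if sc then (pvCnt steps.reverse : Int) else 0)

def pvSK (steps : List (List (String × Int))) (sw sc : Bool) : PySem.Set Int :=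
  (PySem.List.pyRange ((steps.length : Int) - 1) (pvHiI steps sc - 1) (-1)).foldl
    PySem.Set.add (PySem.List.pyRange 0 (pvLoI steps sw))

theorem pvSkippedA_eq (steps : List (List (String × Int))) (sw sc : Bool) :
    (if sc then
        pvCoolLoop steps (PySem.List.pyRange ((steps.length : Int) - 1) (-1) (-1))
          (if sw then pvWarmLoop steps 0 PySem.Set.empty else PySem.Set.empty)
      else (if sw then pvWarmLoop steps 0 PySem.Set.empty else PySem.Set.empty)) =
    pvSK steps sw sc := by
  have hrn : pvCnt steps.reverse ≤ steps.length := by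
    have := pvCnt_le steps.reverse
    simpa using this
  have hwarm : (if sw then pvWarmLoop steps 0 PySem.Set.empty else PySem.Set.empty) =
      PySem.List.pyRange 0 (pvLoI steps sw) := by
    cases sw with
    | false => simp [pvLoI, PySem.List.pyRange_one_eq_nil (le_refl (0:Int)), PySem.Set.empty]
    | true =>
      simp only [if_pos rfl, pvLoI]
      rw [pvWarm_spec steps 0 PySem.Set.empty (by intro x hx; simp [PySem.Set.empty] at hx)]
      simp [PySem.Set.empty]
  cases sc with
  | false =>
    simp only [Bool.false_eq_true, if_false, hwarm, pvSK]
    have h2 : pvHiI steps false - 1 = (steps.length : Int) - 1 := by simp [pvHiI]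
    rw [h2, PySem.List.pyRange_neg_one_eq_nil (le_refl _)]
    rfl
  | true =>
    rw [if_pos rfl, hwarm, pvCool_spec, pvDesc_takeWhile]
    unfold pvSK pvHiI
    rw [if_pos rfl,
      show ((steps.length - pvCnt steps.reverse : Nat) : Int) - 1 =
        (steps.length : Int) - (pvCnt steps.reverse : Int) - 1 from by omega]

theorem mem_foldl_add_int (l : List Int) : ∀ (s : PySem.Set Int) (y : Int),
    y ∈ l.foldl PySem.Set.add s ↔ y ∈ s ∨ y ∈ l := by
  induction l with
  | nil => intro s y; simp
  | cons x t ih =>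
    intro s y
    simp only [List.foldl_cons, ih, PySem.Set.mem_add, List.mem_cons]
    tauto

theorem mem_pvSK (steps : List (List (String × Int))) (sw sc : Bool) (y : Int) :
    y ∈ pvSK steps sw sc ↔
      (0 ≤ y ∧ y < pvLoI steps sw) ∨ (pvHiI steps sc ≤ y ∧ y < (steps.length : Int)) := by
  rw [pvSK, mem_foldl_add_int, PySem.List.mem_pyRange_one, PySem.List.mem_pyRange_neg_one]
  omega

-- the final build loop: skipping a block whose indices are all in the set
theorem pvBuild_skip (sk : PySem.Set Int) (l1 : List (List (String × Int))) :
    ∀ (l2 : List (List (String × Int))) (i : Int) (filt : List (List (String × Int)))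
      (im : PySem.Dict Int Int),
    (∀ k : Nat, k < l1.length → PySem.Set.contains sk (i + k) = true) →
    pvBuildLoop (l1 ++ l2) i sk filt im = pvBuildLoop l2 (i + l1.length) sk filt im := by
  induction l1 with
  | nil => intro l2 i filt im _; simp [pvBuildLoop]
  | cons x t ih =>
    intro l2 i filt im hmem
    have h0 : PySem.Set.contains sk i = true := by
      have := hmem 0 (by simp)
      simpa using this
    rw [List.cons_append, pvBuildLoop, if_pos h0,
      ih l2 (i+1) filt im (by
        intro k hk
        have := hmem (k+1) (by simpa using Nat.succ_lt_succ hk)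
        rw [show i + ((k:Nat)+1 : Nat) = (i + 1) + (k : Nat) by push_cast; ring] at this
        exact this)]
    congr 1
    simp only [List.length_cons]
    push_cast
    ring

-- keeping a block none of whose indices is in the set
def pvImFold (d : PySem.Dict Int Int) (ps : List (Int × Int)) : PySem.Dict Int Int :=
  ps.foldl (fun d p => d.insert p.1 p.2) d

def pvPairs (base : Nat) (i : Int) (m : Nat) : List (Int × Int) :=
  (List.range m).map (fun k => ((base + k : Nat), i + k))

theorem pvPairs_cons (base : Nat) (i : Int) (m : Nat) :
    pvPairs base i (m + 1) = ((base : Int), i) :: pvPairs (base + 1) (i + 1) m := by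
  rw [pvPairs, pvPairs, List.range_succ_eq_map, List.map_cons, List.map_map]
  simp only [Nat.add_zero, Int.natCast_add, add_zero]
  congr 1
  · simp
  · apply List.map_congr_left
    intro k _
    simp only [Function.comp_apply, Nat.succ_eq_add_one, Prod.mk.injEq]
    exact ⟨by push_cast; ring, by push_cast; ring⟩

theorem pvBuild_keep (sk : PySem.Set Int) (l1 : List (List (String × Int))) :
    ∀ (l2 : List (List (String × Int))) (i : Int) (filt : List (List (String × Int)))
      (im : PySem.Dict Int Int),
    (∀ k : Nat, k < l1.length → PySem.Set.contains sk (i + k) = false) →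
    pvBuildLoop (l1 ++ l2) i sk filt im =
      pvBuildLoop l2 (i + l1.length) sk (filt ++ l1)
        (pvImFold im (pvPairs filt.length i l1.length)) := by
  induction l1 with
  | nil => intro l2 i filt im _; simp [pvBuildLoop, pvPairs, pvImFold]
  | cons x t ih =>
    intro l2 i filt im hmem
    have h0 : PySem.Set.contains sk i = false := by
      have := hmem 0 (by simp)
      simpa using this
    rw [List.cons_append, pvBuildLoop, if_neg (by simp only [h0]; exact Bool.false_ne_true),
      ih l2 (i+1) (filt ++ [x]) (im.insert (filt.length : Int) i) (by
        intro k hk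
        have := hmem (k+1) (by simpa using Nat.succ_lt_succ hk)
        rw [show i + ((k:Nat)+1 : Nat) = (i + 1) + (k : Nat) by push_cast; ring] at this
        exact this)]
    rw [List.length_cons, pvPairs_cons]
    simp only [pvImFold, List.foldl_cons, List.append_assoc, List.singleton_append,
      List.length_append, List.length_singleton]
    congr 1
    push_cast
    ring

theorem pvImFold_items (ps : List (Int × Int)) : ∀ (d : PySem.Dict Int Int),
    (ps.map Prod.fst).Nodup → (∀ p ∈ ps, d.contains p.1 = false) →
    (pvImFold d ps).items = d.items ++ ps := by
  induction ps with
  | nil => intro d _ _; simp [pvImFold]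
  | cons p t ih =>
    intro d hnd hfresh
    simp only [List.map_cons, List.nodup_cons] at hnd
    rw [pvImFold, List.foldl_cons, show (t.foldl (fun d p => d.insert p.1 p.2)
      (d.insert p.1 p.2)) = pvImFold (d.insert p.1 p.2) t from rfl,
      ih (d.insert p.1 p.2) hnd.2 (by
        intro q hq
        rw [PySem.Dict.contains_insert]
        have hne : q.1 ≠ p.1 := fun he => hnd.1 (he ▸ List.mem_map_of_mem hq)
        simp [hne, hfresh q (by simp [hq])]),
      PySem.Dict.items_insert_of_not_contains d p.2 (hfresh p (by simp)), List.append_assoc]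
    rfl

theorem pvLoI_nonneg (steps : List (List (String × Int))) (sw : Bool) : 0 ≤ pvLoI steps sw := by
  cases sw <;> simp [pvLoI]

theorem pvHiI_nonneg (steps : List (List (String × Int))) (sc : Bool) : 0 ≤ pvHiI steps sc := by
  have hrn : pvCnt steps.reverse ≤ steps.length := by
    have := pvCnt_le steps.reverse
    simpa using this
  cases sc <;> simp [pvHiI] <;> omega

theorem pvLoI_le (steps : List (List (String × Int))) (sw : Bool) :
    pvLoI steps sw ≤ (steps.length : Int) := by
  have := pvCnt_le steps
  cases sw <;> simp [pvLoI] <;> omega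

theorem pvHiI_le (steps : List (List (String × Int))) (sc : Bool) :
    pvHiI steps sc ≤ (steps.length : Int) := by
  cases sc <;> simp [pvHiI]

-- items of a dict whose keys 0,1,2,… are fresh and inserted in order
theorem pvImFold_empty_items (lo : Int) (m : Nat) :
    (pvImFold PySem.Dict.empty (pvPairs 0 lo m)).items = pvPairs 0 lo m := by
  rw [pvImFold_items _ _ (by
      rw [pvPairs, List.map_map]
      refine List.Nodup.map ?_ List.nodup_range
      intro a b hab
      simp only [Function.comp_apply] at hab
      omega)
    (fun p _ => PySem.Dict.contains_empty _)]
  rfl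

-- a dict built by inserting the fresh keys 0,1,2,… in order lists its items in that order
theorem pvIdFold_items (m : Nat) (lo : Int) :
    ((PySem.List.pyRange 0 (m : Int)).foldl (fun d j => d.insert j (lo + j))
      PySem.Dict.empty).items = pvPairs 0 lo m := by
  rw [PySem.List.pyRange_zero_nat, List.foldl_map]
  have h1 : ((List.range m).foldl (fun d (k : Nat) => d.insert ((k : Nat) : Int) (lo + ((k : Nat) : Int)))
      PySem.Dict.empty) = pvImFold PySem.Dict.empty (pvPairs 0 lo m) := by
    rw [pvImFold, pvPairs, List.foldl_map]
    congr 1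
    funext d k
    simp
  rw [h1, pvImFold_empty_items]

-- closed form for port B
theorem pvAlt_eq (steps : List (List (String × Int))) (sw sc : Bool) :
    filter_steps_py_alt steps sw sc =
      ((steps.drop (pvLoI steps sw).toNat).take ((pvHiI steps sc).toNat - (pvLoI steps sw).toNat),
       pvSK steps sw sc,
       pvPairs 0 (pvLoI steps sw)
         ((steps.drop (pvLoI steps sw).toNat).take
           ((pvHiI steps sc).toNat - (pvLoI steps sw).toNat)).length) := by
  have hlo : (if sw = true then pvRunLen steps else 0) = pvLoI steps sw := by
    cases sw <;> simp [pvLoI, pvRunLen_eq]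
  have hhi : (steps.length : Int) - (if sc = true then pvRunLen steps.reverse else 0) =
      pvHiI steps sc := by
    cases sc <;> simp [pvHiI, pvRunLen_eq]
  have hslice : PySem.List.slice steps (some (pvLoI steps sw)) (some (pvHiI steps sc)) =
      (steps.drop (pvLoI steps sw).toNat).take
        ((pvHiI steps sc).toNat - (pvLoI steps sw).toNat) :=
    PySem.List.slice_toNat _ (pvLoI_nonneg steps sw) (pvHiI_nonneg steps sc)
  simp only [filter_steps_py_alt, hlo, hhi, hslice]
  refine Prod.ext rfl (Prod.ext ?_ ?_)
  · rw [PySem.Set.ofList_eq_self_of_nodup _ (PySem.List.nodup_pyRange_one _ _)]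
    rfl
  · exact pvIdFold_items _ _

-- closed form for A's final loop, run on the closed-form skipped set
theorem pvBuild_main (steps : List (List (String × Int))) (sw sc : Bool) :
    pvBuildLoop steps 0 (pvSK steps sw sc) [] PySem.Dict.empty =
      ((steps.drop (pvLoI steps sw).toNat).take ((pvHiI steps sc).toNat - (pvLoI steps sw).toNat),
       pvImFold PySem.Dict.empty (pvPairs 0 (pvLoI steps sw)
         ((steps.drop (pvLoI steps sw).toNat).take
           ((pvHiI steps sc).toNat - (pvLoI steps sw).toNat)).length)) := by
  set sk := pvSK steps sw sc with hskdef
  have hmem : ∀ y : Int, y ∈ sk ↔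
      (0 ≤ y ∧ y < pvLoI steps sw) ∨ (pvHiI steps sc ≤ y ∧ y < (steps.length : Int)) :=
    mem_pvSK steps sw sc
  set aL := (pvLoI steps sw).toNat with haL
  set aH := (pvHiI steps sc).toNat with haH
  have hLcast : (aL : Int) = pvLoI steps sw := Int.toNat_of_nonneg (pvLoI_nonneg steps sw)
  have hHcast : (aH : Int) = pvHiI steps sc := Int.toNat_of_nonneg (pvHiI_nonneg steps sc)
  have hLn : aL ≤ steps.length := by
    have := pvLoI_le steps sw
    omega
  have hHn : aH ≤ steps.length := by
    have := pvHiI_le steps sc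
    omega
  by_cases hdeg : aH < aL
  · -- overlapping cut points: every index is skipped and the middle slice is empty
    have hmid : (steps.drop aL).take (aH - aL) = [] := by
      rw [show aH - aL = 0 from by omega]
      exact List.take_zero
    rw [hmid]
    have hsteps : steps = steps ++ [] := by rw [List.append_nil]
    conv_lhs => rw [hsteps]
    rw [pvBuild_skip sk steps [] 0 [] PySem.Dict.empty (by
      intro k hk
      refine (PySem.Set.contains_iff _ _).mpr ((hmem _).mpr ?_)
      by_cases hkL : (k : Int) < pvLoI steps sw
      · exact Or.inl ⟨by positivity, by omega⟩
      · refine Or.inr ⟨by omega, by omega⟩)]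
    rw [pvBuildLoop]
    simp [pvPairs, pvImFold]
  · -- ordinary case: skip [0, aL), keep [aL, aH), skip [aH, n)
    set mid := (steps.drop aL).take (aH - aL) with hmiddef
    have hlen1 : (steps.take aL).length = aL := by
      rw [List.length_take]
      omega
    have hlen2 : mid.length = aH - aL := by
      rw [hmiddef, List.length_take, List.length_drop]
      omega
    have hlen3 : (steps.drop aH).length = steps.length - aH := List.length_drop
    have hsteps : steps = steps.take aL ++ (mid ++ (steps.drop aH ++ [])) := by
      rw [List.append_nil, hmiddef]
      conv_lhs => rw [← List.take_append_drop aH steps]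
      rw [show aH = aL + (aH - aL) from by omega, List.take_add]
      rw [List.append_assoc]
      rw [show aL + (aH - aL) - aL = aH - aL from by omega,
        show aL + (aH - aL) = aH from by omega]
    conv_lhs => rw [hsteps]
    rw [pvBuild_skip sk (steps.take aL) _ 0 [] PySem.Dict.empty (by
      intro k hk
      rw [hlen1] at hk
      refine (PySem.Set.contains_iff _ _).mpr ((hmem _).mpr (Or.inl ⟨by positivity, by omega⟩)))]
    rw [hlen1, zero_add]
    rw [pvBuild_keep sk mid _ (aL : Int) [] PySem.Dict.empty (by
      intro k hk
      rw [hlen2] at hk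
      refine Bool.eq_false_iff.mpr (fun hc => ?_)
      have := (hmem _).mp ((PySem.Set.contains_iff _ _).mp hc)
      omega)]
    rw [hlen2, List.nil_append]
    rw [pvBuild_skip sk (steps.drop aH) [] _ mid _ (by
      intro k hk
      rw [hlen3] at hk
      refine (PySem.Set.contains_iff _ _).mpr ((hmem _).mpr (Or.inr ⟨by omega, by omega⟩)))]
    rw [pvBuildLoop]
    refine Prod.ext rfl ?_
    simp only [List.length_nil, hLcast]

-- the identity-map branch of A, as pvPairs
theorem pvIdBranch_items (n : Nat) :
    ((PySem.List.pyRange 0 (n : Int)).foldl (fun d i => d.insert i i) PySem.Dict.empty).items =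
      pvPairs 0 0 n := by
  rw [show (fun (d : PySem.Dict Int Int) (i : Int) => d.insert i i) =
      (fun (d : PySem.Dict Int Int) (j : Int) => d.insert j ((0 : Int) + j)) from by
    funext d i
    rw [zero_add]]
  exact pvIdFold_items n 0

theorem pv_main (steps : List (List (String × Int))) (sw sc : Bool) :
    filter_steps_py steps sw sc = filter_steps_py_alt steps sw sc := by
  rw [pvAlt_eq]
  by_cases h0 : (steps.isEmpty || (!sw && !sc)) = true
  · rw [filter_steps_py, if_pos h0]
    have hcase : steps = [] ∨ (sw = false ∧ sc = false) := by
      rcases Bool.or_eq_true_iff.mp h0 with h | h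
      · exact Or.inl (List.isEmpty_iff.mp h)
      · rcases Bool.and_eq_true_iff.mp h with ⟨h1, h2⟩
        refine Or.inr ⟨?_, ?_⟩
        · cases sw with
          | false => rfl
          | true => simp at h1
        · cases sc with
          | false => rfl
          | true => simp at h2
    have hlo : pvLoI steps sw = 0 := by
      rcases hcase with h | ⟨h1, _⟩
      · subst h
        cases sw <;> simp [pvLoI, pvCnt]
      · subst h1
        simp [pvLoI]
    have hhi : pvHiI steps sc = (steps.length : Int) := by
      rcases hcase with h | ⟨_, h2⟩
      · subst h
        cases sc <;> simp [pvHiI, pvCnt]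
      · subst h2
        simp [pvHiI]
    rw [hlo, hhi]
    refine Prod.ext ?_ (Prod.ext ?_ ?_)
    · simp
    · show PySem.Set.empty = pvSK steps sw sc
      rw [pvSK, hlo, hhi]
      rw [PySem.List.pyRange_one_eq_nil (le_refl (0:Int)),
        PySem.List.pyRange_neg_one_eq_nil (by omega)]
      rfl
    · show ((PySem.List.pyRange 0 (steps.length : Int)).foldl
          (fun d i => d.insert i i) PySem.Dict.empty).items = _
      rw [pvIdBranch_items]
      congr 1
      simp
  · rw [filter_steps_py, if_neg h0]
    have hsk := pvSkippedA_eq steps sw sc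
    simp only [hsk, pvBuild_main]
    rw [pvImFold_empty_items]

-- ===== VERDICT (by name: the statement is the Claim_ definition above) =====
theorem filter_steps_py_spec : Claim_equal_filter_steps_py := by
  intro steps sw sc _
  exact pv_main steps sw sc
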